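-- pv_equiv track=rewrite | github.com/blerandaisufi/Rrjeta1 | HOST_KlientiUDP.py | zanoret
-- ===== SOURCE A (Python) =====
-- def zanoret(mesazhi):
--      zanoret="ae"
--      iterator=0
--      mesazhi=' '.join(mesazhi.split()[1:])
--      for char in mesazhi:
--        if char in zanoret:
--            iterator+=1
--      return iterator
-- ===== SOURCE B (Python) =====
-- def zanoret(mesazhi):
--     words = mesazhi.split()
--     if not words:
--         return 0
--     first = words[0]
--     return (mesazhi.count('a') + mesazhi.count('e')
--             - first.count('a') - first.count('e'))
-- ===== Notes on version B (the rewrite author's own statement) =====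
-- stated objective: simpler
-- what changed: Instead of rebuilding the tail substring with join and counting vowels in a per-character loop, B counts the two vowels over the whole message with str.count and subtracts the first word's counts (whitespace and the joining spaces hold no vowels).
import Mathlib
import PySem

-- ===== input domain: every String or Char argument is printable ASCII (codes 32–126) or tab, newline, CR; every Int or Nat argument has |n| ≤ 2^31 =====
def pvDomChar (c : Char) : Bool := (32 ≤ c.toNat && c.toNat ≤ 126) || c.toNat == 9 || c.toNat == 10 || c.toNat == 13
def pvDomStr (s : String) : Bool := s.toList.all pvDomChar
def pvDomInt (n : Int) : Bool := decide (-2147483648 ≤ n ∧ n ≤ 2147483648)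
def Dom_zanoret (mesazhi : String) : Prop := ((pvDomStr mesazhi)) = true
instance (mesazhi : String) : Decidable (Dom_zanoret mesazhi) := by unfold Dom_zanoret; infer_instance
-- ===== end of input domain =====

-- B counts 'a'/'e' once over the whole message and subtracts the first word's counts,
-- instead of rebuilding the tail substring and scanning it character by character.

-- ===== PORT A =====
def zanoret (mesazhi : String) : Int :=
  let zan : String := "ae"
  let iterator : Int := 0
  let rest : List Char :=
    PySem.Chars.join [' '] (PySem.List.slice (PySem.Chars.split₀ mesazhi.toList) (some 1) none)
  rest.foldl (fun it ch => if PySem.Chars.isIn [ch] zan.toList then it + 1 else it) iterator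

-- ===== PORT B =====
def zanoret_alt (mesazhi : String) : Int :=
  match PySem.Chars.split₀ mesazhi.toList with
  | [] => 0
  | first :: _ =>
      (PySem.Chars.count mesazhi.toList ['a'] : Int) + (PySem.Chars.count mesazhi.toList ['e'] : Int)
        - (PySem.Chars.count first ['a'] : Int) - (PySem.Chars.count first ['e'] : Int)

-- ===== PRECONDITION & SPEC =====
def Spec_zanoret (mesazhi : String) (out : Int) : Prop := out = zanoret_alt mesazhi
instance (mesazhi : String) (out : Int) : Decidable (Spec_zanoret mesazhi out) := by unfold Spec_zanoret; infer_instance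

-- ===== CLAIM (what is proved, stated in full; the proofs are below) =====
def Claim_equal_zanoret : Prop := ∀ (mesazhi : String), Dom_zanoret mesazhi → Spec_zanoret mesazhi (zanoret mesazhi)

-- ===== LEMMAS AND PROOFS =====

-- total count of c over a list of words
def sumC (c : Char) (ws : List (List Char)) : Nat := (ws.map (List.count c)).sum

theorem sumC_reverse (c : Char) (ws : List (List Char)) : sumC c ws.reverse = sumC c ws := by
  simp [sumC, List.map_reverse, List.sum_reverse]

-- s.count(ch) for a single-character needle is the list count
theorem countgo_single (c : Char) : ∀ (s : List Char) (acc : Nat),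
    PySem.Chars.count.go [c] s.length s acc = acc + s.count c := by
  intro s
  induction s with
  | nil => intro acc; simp [PySem.Chars.count.go]
  | cons h t ih =>
    intro acc
    show PySem.Chars.count.go [c] (t.length + 1) (h :: t) acc = _
    rw [PySem.Chars.count.go]
    simp only [List.isPrefixOf, Bool.and_true, List.length_singleton, List.drop_succ_cons,
      List.drop_zero, List.count_cons]
    by_cases hc : c = h
    · subst hc; simp [ih]; omega
    · simp [hc, Ne.symm hc, ih]

theorem count_single (s : List Char) (c : Char) :
    PySem.Chars.count s [c] = s.count c := by
  simp [PySem.Chars.count, countgo_single]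

-- joining with a single space adds no non-space character
theorem count_intercalate_space (c : Char) (hc : c ≠ ' ') :
    ∀ ws : List (List Char), (List.intercalate [' '] ws).count c = sumC c ws := by
  intro ws
  induction ws with
  | nil => simp [List.intercalate, sumC]
  | cons w ws ih =>
    cases ws with
    | nil => simp [List.intercalate, List.intersperse, sumC]
    | cons w' ws' =>
      have h : List.intercalate [' '] (w :: w' :: ws') =
          w ++ [' '] ++ List.intercalate [' '] (w' :: ws') := by
        simp [List.intercalate, List.intersperse]
      rw [h]
      simp only [List.count_append, ih, sumC, List.map_cons, List.sum_cons]
      simp [Ne.symm hc]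

-- the words of split() carry exactly the non-space characters of the string
theorem splitgo_sum (c : Char) (hc : PySem.Chars.isspace c = false) :
    ∀ (rest cur : List Char) (acc : List (List Char)),
      sumC c (PySem.Chars.split₀.go rest cur acc) = sumC c acc + cur.count c + rest.count c := by
  intro rest
  induction rest with
  | nil =>
    intro cur acc
    rw [PySem.Chars.split₀.go]
    by_cases h : cur.isEmpty
    · simp [sumC_reverse, List.isEmpty_iff.mp h]
    · simp [h, sumC, List.sum_reverse]
  | cons c' rest ih =>
    intro cur acc
    rw [PySem.Chars.split₀.go]
    by_cases hs : PySem.Chars.isspace c'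
    · have hne : c ≠ c' := by intro h; rw [h] at hc; rw [hs] at hc; cases hc
      simp only [hs, if_true]
      by_cases h : cur.isEmpty
      · rw [if_pos h, ih]
        simp [List.isEmpty_iff.mp h, Ne.symm hne]
      · rw [if_neg h, ih]
        simp [sumC, Ne.symm hne, List.count_reverse]
        omega
    · simp [hs, ih, List.count_cons]
      rcases eq_or_ne c' c with h | h
      · simp [h]; omega
      · simp [h]

theorem count_eq_sum_split (c : Char) (hc : PySem.Chars.isspace c = false) (s : List Char) :
    s.count c = sumC c (PySem.Chars.split₀ s) := by
  have := splitgo_sum c hc s [] []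
  simpa [PySem.Chars.split₀, sumC] using this.symm

theorem isIn_single_ae (ch : Char) :
    PySem.Chars.isIn [ch] ['a', 'e'] = (ch == 'a' || ch == 'e') := by
  by_cases h1 : ch = 'a'
  · subst h1; decide
  · by_cases h2 : ch = 'e'
    · subst h2; decide
    · have hmem : ¬ ([ch] <:+: ['a', 'e']) := by
        rw [List.singleton_infix_iff]; simp [h1, h2]
      have hx : PySem.Chars.isIn [ch] ['a', 'e'] = false :=
        (PySem.Chars.isIn_eq_false_iff _ _).mpr hmem
      simp [hx, h1, h2]

theorem countP_ae (cs : List Char) :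
    cs.countP (fun ch => PySem.Chars.isIn [ch] ['a', 'e']) = cs.count 'a' + cs.count 'e' := by
  induction cs with
  | nil => simp
  | cons h t ih =>
    rw [List.countP_cons, isIn_single_ae, List.count_cons, List.count_cons, ih]
    by_cases h1 : h = 'a' <;> by_cases h2 : h = 'e' <;> simp [h1, h2] <;> omega

theorem hae_a : PySem.Chars.isspace 'a' = false := by decide
theorem hae_e : PySem.Chars.isspace 'e' = false := by decide

-- ===== VERDICT (by name: the statement is the Claim_ definition above) =====
theorem zanoret_spec : Claim_equal_zanoret := by
  intro m _
  unfold Spec_zanoret zanoret zanoret_alt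
  simp only [PySem.List.slice_from_one, PySem.Chars.join]
  rw [PySem.List.foldl_if_add_one]
  simp only [show "ae".toList = ['a', 'e'] from rfl]
  rw [countP_ae]
  have ha := count_eq_sum_split 'a' hae_a m.toList
  have he := count_eq_sum_split 'e' hae_e m.toList
  cases hsp : PySem.Chars.split₀ m.toList with
  | nil => simp [List.intercalate]
  | cons w ws =>
    rw [hsp] at ha he
    simp only [List.tail_cons,
      count_intercalate_space 'a' (by decide) ws, count_intercalate_space 'e' (by decide) ws,
      count_single]
    rw [ha, he]
    simp only [sumC, List.map_cons, List.sum_cons]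
    push_cast
    ring
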